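-- pv_equiv track=rewrite | github.com/daniellu/SoySauceStock | soysaucestock/yahoo_earningdate_scraper.py | _extract_html
-- ===== SOURCE A (Python) =====
-- def _extract_html(html_to_extract):
--     inner_text = html_to_extract.split('\n')
--     for index in range(len(inner_text)):
--         if('Earnings' in inner_text[index]):
--             earnDateFullText = inner_text[index]
--             earnDateValue = earnDateFullText[15:]
--             return earnDateValue
--     return ''
-- ===== SOURCE B (Python) =====
-- def _extract_html(html_to_extract):
--     pos = html_to_extract.find('Earnings')
--     if pos == -1:
--         return ''
--     start = html_to_extract.rfind('\n', 0, pos) + 1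
--     end = html_to_extract.find('\n', pos)
--     if end == -1:
--         end = len(html_to_extract)
--     return html_to_extract[start:end][15:]
-- ===== Notes on version B (the rewrite author's own statement) =====
-- stated objective: idiomatic
-- what changed: Replaces building the full list of lines via split('\n') and scanning it with a direct substring search: one find('Earnings') plus rfind/find for the enclosing line boundaries, slicing that single line.
import Mathlib
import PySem

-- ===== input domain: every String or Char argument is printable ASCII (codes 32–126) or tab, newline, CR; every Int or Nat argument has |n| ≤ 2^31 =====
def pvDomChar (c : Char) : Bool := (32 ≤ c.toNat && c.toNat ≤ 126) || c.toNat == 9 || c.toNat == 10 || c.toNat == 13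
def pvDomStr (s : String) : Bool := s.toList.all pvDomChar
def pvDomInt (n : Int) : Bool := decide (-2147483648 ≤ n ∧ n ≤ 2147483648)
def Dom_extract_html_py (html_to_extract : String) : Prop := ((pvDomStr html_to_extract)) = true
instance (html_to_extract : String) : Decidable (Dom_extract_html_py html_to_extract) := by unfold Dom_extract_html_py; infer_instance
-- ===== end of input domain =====

-- B replaces A's split('\n')-and-scan with one find('Earnings') plus rfind/find line-boundary
-- arithmetic (no list of lines is built); the return values are proved equal on every input.

-- ===== PORT A =====
-- the for-loop over the split lines (early return on the first line containing 'Earnings')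
def pvALoop (lines : List (List Char)) : List Char :=
  match lines with
  | [] => []
  | line :: rest =>
    if PySem.Chars.isIn "Earnings".toList line
    then PySem.Chars.slice line (some 15) none
    else pvALoop rest

def extract_html_py (html_to_extract : String) : String :=
  String.ofList (pvALoop (PySem.Chars.splitOn html_to_extract.toList "\n".toList))

-- ===== PORT B =====
def pvBCore (s : List Char) : List Char :=
  let pos := PySem.Chars.find s "Earnings".toList
  if pos = -1 then []
  else
    let start := PySem.Chars.rfindFrom s "\n".toList 0 (some pos) + 1
    let stop := PySem.Chars.findFrom s "\n".toList pos none
    let stop2 := if stop = -1 then (s.length : Int) else stop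
    PySem.Chars.slice (PySem.Chars.slice s (some start) (some stop2)) (some 15) none

def extract_html_py_alt (html_to_extract : String) : String :=
  String.ofList (pvBCore html_to_extract.toList)

-- ===== PRECONDITION & SPEC =====
def Spec_extract_html_py (html_to_extract : String) (out : String) : Prop := out = extract_html_py_alt html_to_extract
instance (html_to_extract : String) (out : String) : Decidable (Spec_extract_html_py html_to_extract out) := by unfold Spec_extract_html_py; infer_instance

-- ===== CLAIM (what is proved, stated in full; the proofs are below) =====
def Claim_equal_extract_html_py : Prop := ∀ (html_to_extract : String), Dom_extract_html_py html_to_extract → Spec_extract_html_py html_to_extract (extract_html_py html_to_extract)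

-- ===== LEMMAS AND PROOFS =====

-- singleton prefix

theorem pv_single_prefix_iff (c : Char) (u : List Char) : ([c] <+: u) ↔ u.head? = some c := by
  constructor
  · rintro ⟨t, rfl⟩; rfl
  · intro h; cases u with
    | nil => simp at h
    | cons a t => simp at h; subst h; exact ⟨t, rfl⟩

-- occurrence transfer, i within the first line
theorem pv_prefix_split {sub : List Char} (hsub : ('\n' : Char) ∉ sub)
    (l r : List Char) {i : ℕ} (hi : i ≤ l.length) :
    (sub <+: (l ++ '\n' :: r).drop i) ↔ (sub <+: l.drop i) := by
  rw [List.drop_append_of_le_length hi]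
  constructor
  · intro h
    by_cases hlen : sub.length ≤ (l.drop i).length
    · exact (List.isPrefix_append_of_length hlen).mp h
    · exfalso
      rw [not_le] at hlen
      have hget := h.getElem (i := (l.drop i).length) hlen
      rw [List.getElem_append_right (le_refl _)] at hget
      have hc : sub[(List.drop i l).length] = '\n' := by simpa using hget
      exact hsub (hc ▸ List.getElem_mem hlen)
  · intro h; exact h.trans (List.prefix_append _ _)

-- find = j characterization
theorem pv_find_eq {s sub : List Char} {j : ℕ} (h1 : sub <+: s.drop j)
    (h2 : ∀ i < j, ¬ sub <+: s.drop i) : PySem.Chars.find s sub = (j : ℤ) := by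
  have hpos : 0 ≤ PySem.Chars.find s sub := by
    rw [PySem.Chars.find_nonneg_iff]
    exact h1.isInfix.trans (List.drop_suffix _ _).isInfix
  obtain ⟨hp, hmin⟩ := PySem.Chars.find_spec hpos
  have : (PySem.Chars.find s sub).toNat = j := by
    rcases lt_trichotomy (PySem.Chars.find s sub).toNat j with h | h | h
    · exact absurd hp (h2 _ h)
    · exact h
    · exact absurd h1 (hmin _ h)
  omega

-- find of ['\n'] in a newline-free list is -1
theorem pv_find_nl_none {t : List Char} (ht : ('\n' : Char) ∉ t) :
    PySem.Chars.find t ['\n'] = -1 := by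
  rw [PySem.Chars.find_eq_neg_one_iff]
  intro hinf
  exact ht (hinf.mem (by simp))

-- find of ['\n'] in l ++ '\n'::r with newline-free l
theorem pv_find_nl {l : List Char} (r : List Char) (hl : ('\n' : Char) ∉ l) :
    PySem.Chars.find (l ++ '\n' :: r) ['\n'] = (l.length : ℤ) := by
  apply pv_find_eq (j := l.length)
  · rw [List.drop_append_of_le_length (le_refl _)]
    simp
  · intro i hi
    rw [pv_single_prefix_iff, List.drop_append_of_le_length (le_of_lt hi)]
    cases hd : List.drop i l with
    | nil => simp at hd; omega
    | cons a t =>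
      simp only [List.cons_append, List.head?_cons, Option.some.injEq]
      intro hcontra
      subst hcontra
      have hmem : ('\n' : Char) ∈ List.drop i l := by rw [hd]; simp
      exact hl (List.mem_of_mem_drop hmem)

-- any drop of l ++ '\n'::r beyond the first line is a drop of r
theorem pv_drop_past (l r : List Char) (i : ℕ) :
    (l ++ '\n' :: r).drop (l.length + 1 + i) = r.drop i := by
  have : l.length + 1 + i = l.length + (1 + i) := by omega
  rw [this, List.drop_length_add_append, Nat.add_comm 1 i]
  rfl

-- find of a newline-free nonempty pattern across the first-line split
theorem pv_find_append {sub : List Char} (l r : List Char)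
    (hsub : ('\n' : Char) ∉ sub) :
    PySem.Chars.find (l ++ '\n' :: r) sub =
      if PySem.Chars.isIn sub l then PySem.Chars.find l sub
      else (if PySem.Chars.find r sub = -1 then -1
            else (l.length : ℤ) + 1 + PySem.Chars.find r sub) := by
  by_cases h : PySem.Chars.isIn sub l = true
  · rw [if_pos h]
    have hf : 0 ≤ PySem.Chars.find l sub := by
      rw [PySem.Chars.find_nonneg_iff]; exact (PySem.Chars.isIn_iff_infix _ _).mp h
    obtain ⟨hp, hmin⟩ := PySem.Chars.find_spec hf
    have hjle : (PySem.Chars.find l sub).toNat ≤ l.length := by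
      have := PySem.Chars.find_le_length l sub; omega
    have := pv_find_eq (s := l ++ '\n' :: r) (j := (PySem.Chars.find l sub).toNat)
      ((pv_prefix_split hsub l r hjle).mpr hp)
      (fun i hi => by
        rw [pv_prefix_split hsub l r (le_trans (le_of_lt hi) hjle)]
        exact hmin i hi)
    rw [this]; omega
  · rw [if_neg h]
    have hnol : ∀ i, ¬ sub <+: l.drop i := by
      intro i hcontra
      exact h ((PySem.Chars.exists_prefix_drop_iff_isIn sub l).mp ⟨i, hcontra⟩)
    by_cases hr : PySem.Chars.find r sub = -1
    · rw [if_pos hr, PySem.Chars.find_eq_neg_one_iff]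
      intro hinf
      obtain ⟨j, hj⟩ := (PySem.Chars.exists_prefix_drop_iff_isIn sub _).symm.mp
        ((PySem.Chars.isIn_iff_infix _ _).mpr hinf)
      by_cases hjl : j ≤ l.length
      · exact hnol j ((pv_prefix_split hsub l r hjl).mp hj)
      · have hrw : j = l.length + 1 + (j - l.length - 1) := by omega
        rw [hrw, pv_drop_past] at hj
        rw [PySem.Chars.find_eq_neg_one_iff] at hr
        exact hr (hj.isInfix.trans (List.drop_suffix _ _).isInfix)
    · rw [if_neg hr]
      have hfr : 0 ≤ PySem.Chars.find r sub := by
        have := PySem.Chars.neg_one_le_find r sub; omega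
      obtain ⟨hp, hmin⟩ := PySem.Chars.find_spec hfr
      have := pv_find_eq (s := l ++ '\n' :: r) (sub := sub)
        (j := l.length + 1 + (PySem.Chars.find r sub).toNat)
        (by rw [pv_drop_past]; exact hp)
        (fun i hi => by
          by_cases hil : i ≤ l.length
          · rw [pv_prefix_split hsub l r hil]; exact hnol i
          · have hrw : i = l.length + 1 + (i - l.length - 1) := by omega
            rw [hrw, pv_drop_past]
            exact hmin _ (by omega))
      rw [this]; push_cast; omega

-- rfind.go of ['\n'] over a newline-free list is -1
theorem pv_rfind_go_none {t : List Char} (ht : ('\n' : Char) ∉ t) :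
    ∀ k, PySem.Chars.rfind.go t ['\n'] k = -1 := by
  intro k
  induction k with
  | zero =>
    simp only [PySem.Chars.rfind.go]
    rw [if_neg]
    intro hcontra
    rw [List.isPrefixOf_iff_prefix, pv_single_prefix_iff] at hcontra
    cases t with
    | nil => simp at hcontra
    | cons a u => simp at hcontra; exact ht (by simp [hcontra])
  | succ j ih =>
    simp only [PySem.Chars.rfind.go]
    rw [if_neg, ih]
    intro hcontra
    rw [List.isPrefixOf_iff_prefix, pv_single_prefix_iff] at hcontra
    cases hd : List.drop (j+1) t with
    | nil => rw [hd] at hcontra; simp at hcontra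
    | cons a u =>
      rw [hd] at hcontra; simp at hcontra
      have hmem : ('\n' : Char) ∈ List.drop (j+1) t := by rw [hd]; simp [hcontra]
      exact ht (List.mem_of_mem_drop hmem)

-- rfind.go result bound
theorem pv_rfind_go_le (t sub : List Char) : ∀ k, PySem.Chars.rfind.go t sub k ≤ (k : ℤ) := by
  intro k
  induction k with
  | zero => simp only [PySem.Chars.rfind.go]; split <;> simp
  | succ j ih =>
    simp only [PySem.Chars.rfind.go]
    split
    · simp
    · calc PySem.Chars.rfind.go t sub j ≤ (j : ℤ) := ih
        _ ≤ ((j+1 : ℕ) : ℤ) := by push_cast; omega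

-- rfind.go ≥ -1
theorem pv_rfind_go_ge (t sub : List Char) : ∀ k, -1 ≤ PySem.Chars.rfind.go t sub k := by
  intro k
  induction k with
  | zero => simp only [PySem.Chars.rfind.go]; split <;> simp
  | succ j ih =>
    simp only [PySem.Chars.rfind.go]
    split
    · have : (0:ℤ) ≤ ((j+1 : ℕ) : ℤ) := by positivity
      omega
    · exact ih

-- rfind.go hits the separator at position l.length
theorem pv_rfind_go_sep (l t' : List Char) :
    PySem.Chars.rfind.go (l ++ '\n' :: t') ['\n'] l.length = (l.length : ℤ) := by
  have hdrop : (l ++ '\n' :: t').drop l.length = '\n' :: t' := by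
    simp
  cases hl : l.length with
  | zero =>
    have hnil : l = [] := List.eq_nil_of_length_eq_zero hl
    subst hnil
    simp only [PySem.Chars.rfind.go]
    rw [if_pos (by simp)]
    simp
  | succ j =>
    simp only [PySem.Chars.rfind.go]
    rw [if_pos]
    rw [← hl, hdrop]
    simp

-- rfind.go across the first-line split: positions beyond the separator shift
theorem pv_rfind_go_shift (l t' : List Char) :
    ∀ k, PySem.Chars.rfind.go (l ++ '\n' :: t') ['\n'] (l.length + 1 + k) =
      (if PySem.Chars.rfind.go t' ['\n'] k = -1 then (l.length : ℤ)
       else (l.length : ℤ) + 1 + PySem.Chars.rfind.go t' ['\n'] k) := by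
  intro k
  induction k with
  | zero =>
    have h1 : l.length + 1 + 0 = l.length + 1 := by omega
    rw [h1]
    have hdrop : (l ++ '\n' :: t').drop (l.length + 1) = t' := by
      rw [show l.length + 1 = l.length + 1 + 0 by omega, pv_drop_past]
      rfl
    by_cases hp : ['\n'].isPrefixOf t' = true
    · conv_lhs => simp only [PySem.Chars.rfind.go]
      rw [if_pos (by rw [hdrop]; exact hp)]
      conv_rhs => simp only [PySem.Chars.rfind.go]
      have hne : ¬((0:ℤ) = -1) := by omega
      rw [if_pos hp, if_neg hne]
      push_cast; ring
    · conv_lhs => simp only [PySem.Chars.rfind.go]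
      rw [if_neg (by rw [hdrop]; exact hp), pv_rfind_go_sep]
      conv_rhs => simp only [PySem.Chars.rfind.go]
      rw [if_neg hp, if_pos rfl]
  | succ j ih =>
    have h1 : l.length + 1 + (j + 1) = (l.length + 1 + j) + 1 := by omega
    rw [h1]
    have hdrop : (l ++ '\n' :: t').drop (l.length + 1 + j + 1) = t'.drop (j + 1) := by
      rw [show l.length + 1 + j + 1 = l.length + 1 + (j + 1) by omega, pv_drop_past]
    by_cases hp : ['\n'].isPrefixOf (t'.drop (j + 1)) = true
    · conv_lhs => simp only [PySem.Chars.rfind.go]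
      rw [if_pos (by rw [hdrop]; exact hp)]
      conv_rhs => simp only [PySem.Chars.rfind.go]
      have hne : ¬(((j+1 : ℕ) : ℤ) = -1) := by omega
      rw [if_pos hp, if_neg hne]
      push_cast; ring
    · conv_lhs => simp only [PySem.Chars.rfind.go]
      rw [if_neg (by rw [hdrop]; exact hp)]
      conv_rhs => simp only [PySem.Chars.rfind.go]
      rw [if_neg hp]
      exact ih

-- rfindFrom with bounds 0..pos is rfind on the prefix
theorem pv_rfindFrom_eq (s : List Char) (pos : ℤ) (h0 : 0 ≤ pos) (hle : pos ≤ (s.length : ℤ)) :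
    PySem.Chars.rfindFrom s ['\n'] 0 (some pos) =
      (if PySem.Chars.rfind (s.take pos.toNat) ['\n'] = -1 then -1
       else PySem.Chars.rfind (s.take pos.toNat) ['\n']) := by
  simp only [PySem.Chars.rfindFrom]
  rw [if_neg (not_lt.mpr hle), if_neg (not_lt.mpr h0), if_neg (lt_irrefl (0:ℤ)),
    if_neg (not_lt.mpr h0)]
  simp only [Int.toNat_zero, List.drop_zero]
  split <;> omega

-- splitOn.go on ['\n']: a newline-free remainder closes the last piece
theorem pv_splitOn_go_last {u : List Char} (hu : ('\n' : Char) ∉ u) :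
    ∀ (fuel : ℕ) (cur : List Char) (acc : List (List Char)), u.length ≤ fuel →
      PySem.Chars.splitOn.go ['\n'] fuel u cur acc = ((cur.reverse ++ u) :: acc).reverse := by
  induction u with
  | nil =>
    intro fuel cur acc _
    cases fuel <;> simp [PySem.Chars.splitOn.go]
  | cons c t ih =>
    intro fuel cur acc hlen
    have hc : c ≠ '\n' := by intro h; exact hu (by simp [h])
    cases fuel with
    | zero => simp at hlen
    | succ f =>
      simp only [PySem.Chars.splitOn.go]
      rw [if_neg (by simpa using Ne.symm hc)]
      rw [ih (fun h => hu (by simp [h])) f (c :: cur) acc (by simpa using hlen)]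
      simp

-- splitOn.go on ['\n']: consuming the first line
theorem pv_splitOn_go_line {l : List Char} (hl : ('\n' : Char) ∉ l) (r : List Char) :
    ∀ (fuel : ℕ) (cur : List Char) (acc : List (List Char)),
      PySem.Chars.splitOn.go ['\n'] (fuel + l.length + 1) (l ++ '\n' :: r) cur acc =
        PySem.Chars.splitOn.go ['\n'] fuel r [] ((cur.reverse ++ l) :: acc) := by
  induction l with
  | nil =>
    intro fuel cur acc
    simp only [List.length_nil, Nat.add_zero, List.nil_append]
    simp only [PySem.Chars.splitOn.go]
    rw [if_pos (by simp)]
    simp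
  | cons c t ih =>
    intro fuel cur acc
    have hc : c ≠ '\n' := by intro h; exact hl (by simp [h])
    have harith : fuel + (c :: t).length + 1 = (fuel + t.length + 1) + 1 := by simp; omega
    rw [harith]
    simp only [PySem.Chars.splitOn.go, List.cons_append]
    rw [if_neg (by simpa using Ne.symm hc)]
    rw [ih (fun h => hl (by simp [h])) fuel (c :: cur) acc]
    simp

-- splitOn.go: the accumulator only prepends
theorem pv_splitOn_go_acc :
    ∀ (fuel : ℕ) (u cur : List Char) (acc : List (List Char)),
      PySem.Chars.splitOn.go ['\n'] fuel u cur acc =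
        acc.reverse ++ PySem.Chars.splitOn.go ['\n'] fuel u cur [] := by
  intro fuel
  induction fuel with
  | zero => intro u cur acc; simp [PySem.Chars.splitOn.go]
  | succ f ih =>
    intro u cur acc
    cases u with
    | nil => simp [PySem.Chars.splitOn.go]
    | cons c rest =>
      simp only [PySem.Chars.splitOn.go]
      by_cases hp : ['\n'].isPrefixOf (c :: rest) = true
      · rw [if_pos hp, if_pos hp, ih _ _ (cur.reverse :: acc), ih _ _ [cur.reverse]]
        simp
      · rw [if_neg hp, if_neg hp, ih]

-- split('\n') of a newline-free string
theorem pv_splitOn_single {u : List Char} (hu : ('\n' : Char) ∉ u) :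
    PySem.Chars.splitOn u ['\n'] = [u] := by
  unfold PySem.Chars.splitOn
  rw [pv_splitOn_go_last hu _ _ _ (by omega)]
  simp

-- split('\n') peels the first line
theorem pv_splitOn_cons {l : List Char} (hl : ('\n' : Char) ∉ l) (r : List Char) :
    PySem.Chars.splitOn (l ++ '\n' :: r) ['\n'] = l :: PySem.Chars.splitOn r ['\n'] := by
  unfold PySem.Chars.splitOn
  have harith : (l ++ '\n' :: r).length + 1 = (r.length + 1) + l.length + 1 := by simp; omega
  rw [harith, pv_splitOn_go_line hl r (r.length + 1) [] []]
  rw [pv_splitOn_go_acc]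
  simp

-- slicing after the separator is slicing the tail
theorem pv_slice_shift (l r : List Char) (a b : ℤ) (ha : 0 ≤ a) (hb : 0 ≤ b)
    (ha' : a ≤ (r.length : ℤ)) (hb' : b ≤ (r.length : ℤ)) :
    PySem.List.slice (l ++ '\n' :: r) (some ((l.length : ℤ) + 1 + a)) (some ((l.length : ℤ) + 1 + b)) =
      PySem.List.slice r (some a) (some b) := by
  have hlen : ((l ++ '\n' :: r).length : ℤ) = l.length + 1 + r.length := by simp; omega
  rw [PySem.List.slice_of_nonneg _ (by omega) (by omega) (by omega) (by omega),
      PySem.List.slice_of_nonneg _ ha hb ha' hb']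
  have h1 : ((l.length : ℤ) + 1 + a).toNat = l.length + 1 + a.toNat := by omega
  have h2 : ((l.length : ℤ) + 1 + b).toNat = l.length + 1 + b.toNat := by omega
  rw [h1, h2, pv_drop_past]
  congr 1
  omega

theorem pv_nl_toList : "\n".toList = ['\n'] := by decide
theorem pv_base : pvALoop (PySem.Chars.splitOn [] ['\n']) = pvBCore [] := by decide

theorem pv_slice_all (s : List Char) :
    PySem.List.slice s (some 0) (some (s.length : ℤ)) = s := by
  rw [PySem.List.slice_of_nonneg _ (le_refl 0) (by positivity) (by positivity) (le_refl _)]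
  simp

theorem pv_E_lit : "Earnings".toList = ['E','a','r','n','i','n','g','s'] := by decide

theorem pv_core_nonl {s : List Char} (hmem : ('\n' : Char) ∉ s) :
    pvALoop [s] = pvBCore s := by
  simp only [pvALoop, pvBCore, pv_E_lit, pv_nl_toList, PySem.Chars.slice]
  by_cases hfind : PySem.Chars.find s ['E','a','r','n','i','n','g','s'] = -1
  · have hisIn : PySem.Chars.isIn ['E','a','r','n','i','n','g','s'] s = false := by
      simp [PySem.Chars.isIn, hfind]
    rw [hisIn, if_pos hfind]
    simp
  · have hisIn : PySem.Chars.isIn ['E','a','r','n','i','n','g','s'] s = true := by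
      simp [PySem.Chars.isIn, hfind]
    have h0 : 0 ≤ PySem.Chars.find s ['E','a','r','n','i','n','g','s'] := by
      have := PySem.Chars.neg_one_le_find s ['E','a','r','n','i','n','g','s']; omega
    have hle := PySem.Chars.find_le_length s ['E','a','r','n','i','n','g','s']
    have hrf : PySem.Chars.rfindFrom s ['\n'] 0
        (some (PySem.Chars.find s ['E','a','r','n','i','n','g','s'])) = -1 := by
      rw [pv_rfindFrom_eq s _ h0 hle]
      have hnone : PySem.Chars.rfind
          (s.take (PySem.Chars.find s ['E','a','r','n','i','n','g','s']).toNat) ['\n'] = -1 := by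
        unfold PySem.Chars.rfind
        exact pv_rfind_go_none (fun h => hmem (List.mem_of_mem_take h)) _
      rw [hnone]; simp
    have hff : PySem.Chars.findFrom s ['\n']
        (PySem.Chars.find s ['E','a','r','n','i','n','g','s']) none = -1 := by
      rw [← Int.toNat_of_nonneg h0,
        PySem.Chars.findFrom_natCast s _ _ (by omega)]
      rw [pv_find_nl_none (fun h => hmem (List.mem_of_mem_drop h))]
      simp
    rw [hisIn, if_neg hfind, hrf, hff]
    norm_num [pv_slice_all]

theorem pv_slice_prefix (l x : List Char) :
    PySem.List.slice (l ++ x) (some 0) (some (l.length : ℤ)) = l := by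
  rw [PySem.List.slice_of_nonneg _ (le_refl 0) (by positivity) (by positivity)
    (by simp)]
  simp

-- first line contains the pattern
theorem pv_core_line1 {l : List Char} (r : List Char) (hl : ('\n' : Char) ∉ l)
    (hEl : PySem.Chars.isIn ['E','a','r','n','i','n','g','s'] l = true) :
    pvBCore (l ++ '\n' :: r) =
      PySem.List.slice l (some 15) none := by
  have hlen_s : ((l ++ '\n' :: r).length : ℤ) = l.length + 1 + r.length := by simp; omega
  have hfa := pv_find_append l r (by decide : ('\n' : Char) ∉ ['E','a','r','n','i','n','g','s'])
  rw [if_pos hEl] at hfa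
  have h0l : 0 ≤ PySem.Chars.find l ['E','a','r','n','i','n','g','s'] := by
    rw [PySem.Chars.find_nonneg_iff]
    exact (PySem.Chars.isIn_iff_infix _ _).mp hEl
  have hlel := PySem.Chars.find_le_length l ['E','a','r','n','i','n','g','s']
  have hk : (PySem.Chars.find l ['E','a','r','n','i','n','g','s']).toNat ≤ l.length := by omega
  simp only [pvBCore, pv_E_lit, pv_nl_toList, PySem.Chars.slice]
  rw [hfa, if_neg (by omega)]
  have hrf : PySem.Chars.rfindFrom (l ++ '\n' :: r) ['\n'] 0
      (some (PySem.Chars.find l ['E','a','r','n','i','n','g','s'])) = -1 := by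
    rw [pv_rfindFrom_eq _ _ h0l (by omega)]
    have htake : (l ++ '\n' :: r).take
        (PySem.Chars.find l ['E','a','r','n','i','n','g','s']).toNat =
        l.take (PySem.Chars.find l ['E','a','r','n','i','n','g','s']).toNat :=
      List.take_append_of_le_length hk
    rw [htake]
    have hnone : PySem.Chars.rfind
        (l.take (PySem.Chars.find l ['E','a','r','n','i','n','g','s']).toNat) ['\n'] = -1 := by
      unfold PySem.Chars.rfind
      exact pv_rfind_go_none (fun h => hl (List.mem_of_mem_take h)) _
    rw [hnone]; simp
  have hff : PySem.Chars.findFrom (l ++ '\n' :: r) ['\n']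
      (PySem.Chars.find l ['E','a','r','n','i','n','g','s']) none = (l.length : ℤ) := by
    rw [← Int.toNat_of_nonneg h0l,
      PySem.Chars.findFrom_natCast _ _ _ (by simp; omega)]
    rw [List.drop_append_of_le_length hk,
      pv_find_nl r (fun h => hl (List.mem_of_mem_drop h))]
    rw [if_neg (by omega)]
    rw [List.length_drop]
    omega
  rw [hrf, hff, if_neg (by omega)]
  have h01 : (-1 : ℤ) + 1 = 0 := by norm_num
  rw [h01, pv_slice_prefix]

theorem pv_slice_shift0 (l r : List Char) (b : ℤ) (hb : 0 ≤ b) (hb' : b ≤ (r.length : ℤ)) :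
    PySem.List.slice (l ++ '\n' :: r) (some ((l.length : ℤ) + 1)) (some ((l.length : ℤ) + 1 + b)) =
      PySem.List.slice r (some 0) (some b) := by
  have h := pv_slice_shift l r 0 b (le_refl 0) hb (by positivity) hb'
  rw [show (l.length : ℤ) + 1 + 0 = (l.length : ℤ) + 1 from by ring] at h
  exact h

-- the pattern is not in the first line: B on l ++ '\n' :: r equals B on r
theorem pv_core_shift {l : List Char} (r : List Char)
    (hEl : PySem.Chars.isIn ['E','a','r','n','i','n','g','s'] l = false) :
    pvBCore (l ++ '\n' :: r) = pvBCore r := by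
  have hlen_s : ((l ++ '\n' :: r).length : ℤ) = l.length + 1 + r.length := by simp; omega
  have hfa := pv_find_append l r (by decide : ('\n' : Char) ∉ ['E','a','r','n','i','n','g','s'])
  rw [if_neg (by simp [hEl])] at hfa
  simp only [pvBCore, pv_E_lit, pv_nl_toList, PySem.Chars.slice]
  by_cases hEr : PySem.Chars.find r ['E','a','r','n','i','n','g','s'] = -1
  · rw [if_pos hEr] at hfa
    rw [hfa, hEr]
    simp
  · rw [if_neg hEr] at hfa
    obtain ⟨k, hk⟩ : ∃ k : ℕ, PySem.Chars.find r ['E','a','r','n','i','n','g','s'] = (k : ℤ) := by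
      have := PySem.Chars.neg_one_le_find r ['E','a','r','n','i','n','g','s']
      exact ⟨(PySem.Chars.find r ['E','a','r','n','i','n','g','s']).toNat, by omega⟩
    have hkN : k ≤ r.length := by
      have := PySem.Chars.find_le_length r ['E','a','r','n','i','n','g','s']
      omega
    have hkr : k < r.length := by
      obtain ⟨hp, -⟩ := PySem.Chars.find_spec (s := r)
        (sub := ['E','a','r','n','i','n','g','s']) (by omega)
      have hlen8 := hp.length_le
      rw [List.length_drop] at hlen8
      have : (PySem.Chars.find r ['E','a','r','n','i','n','g','s']).toNat = k := by omega
      rw [this] at hlen8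
      simp at hlen8
      omega
    rw [hfa, hk]
    rw [if_neg (show ¬((l.length:ℤ) + 1 + (k:ℤ) = -1) by omega),
        if_neg (show ¬((k:ℤ) = -1) by omega)]
    -- shared computations
    have hrlen : (r.take k).length = k := by rw [List.length_take]; omega
    have htake : (l ++ '\n' :: r).take ((l.length : ℤ) + 1 + (k : ℤ)).toNat =
        l ++ '\n' :: r.take k := by
      have hc : ((l.length : ℤ) + 1 + (k : ℤ)).toNat = l.length + (1 + k) := by omega
      rw [hc, List.take_length_add_append, Nat.add_comm 1 k]
      rfl
    have hulen : (l ++ '\n' :: r.take k).length = l.length + 1 + k := by simp [hrlen]; omega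
    have hrfs : PySem.Chars.rfindFrom (l ++ '\n' :: r) ['\n'] 0
        (some ((l.length : ℤ) + 1 + (k : ℤ))) =
        (if PySem.Chars.rfind.go (r.take k) ['\n'] k = -1 then (l.length : ℤ)
         else (l.length : ℤ) + 1 + PySem.Chars.rfind.go (r.take k) ['\n'] k) := by
      rw [pv_rfindFrom_eq _ _ (by positivity) (by simp; omega)]
      rw [htake]
      have hu : PySem.Chars.rfind (l ++ '\n' :: r.take k) ['\n'] =
          (if PySem.Chars.rfind.go (r.take k) ['\n'] k = -1 then (l.length : ℤ)
           else (l.length : ℤ) + 1 + PySem.Chars.rfind.go (r.take k) ['\n'] k) := by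
        unfold PySem.Chars.rfind
        rw [hulen]
        exact pv_rfind_go_shift l (r.take k) k
      rw [hu]
      have hge := pv_rfind_go_ge (r.take k) ['\n'] k
      by_cases h1 : PySem.Chars.rfind.go (r.take k) ['\n'] k = -1
      · simp [h1]
      · simp [h1, show ¬((l.length:ℤ) + 1 + PySem.Chars.rfind.go (r.take k) ['\n'] k = -1) by omega]
    have hrfr : PySem.Chars.rfindFrom r ['\n'] 0 (some ((k : ℤ))) =
        (if PySem.Chars.rfind.go (r.take k) ['\n'] k = -1 then (-1 : ℤ)
         else PySem.Chars.rfind.go (r.take k) ['\n'] k) := by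
      rw [pv_rfindFrom_eq _ _ (by positivity) (by omega)]
      have hc : ((k : ℤ)).toNat = k := by omega
      rw [hc]
      unfold PySem.Chars.rfind
      rw [hrlen]
    have hcast : ((l.length : ℤ) + 1 + (k : ℤ)) = ((l.length + 1 + k : ℕ) : ℤ) := by
      push_cast; ring
    have hffs : PySem.Chars.findFrom (l ++ '\n' :: r) ['\n'] ((l.length : ℤ) + 1 + (k : ℤ)) none =
        (if PySem.Chars.find (r.drop k) ['\n'] = -1 then (-1 : ℤ)
         else ((l.length + 1 + k : ℕ) : ℤ) + PySem.Chars.find (r.drop k) ['\n']) := by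
      rw [hcast, PySem.Chars.findFrom_natCast _ _ _ (by simp; omega), pv_drop_past]
    have hffr : PySem.Chars.findFrom r ['\n'] ((k : ℤ)) none =
        (if PySem.Chars.find (r.drop k) ['\n'] = -1 then (-1 : ℤ)
         else (k : ℤ) + PySem.Chars.find (r.drop k) ['\n']) := by
      rw [PySem.Chars.findFrom_natCast _ _ _ (by omega)]
    rw [hrfs, hrfr, hffs, hffr]
    have hge := pv_rfind_go_ge (r.take k) ['\n'] k
    have hle := pv_rfind_go_le (r.take k) ['\n'] k
    have hfge := PySem.Chars.neg_one_le_find (r.drop k) ['\n']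
    have hfle := PySem.Chars.find_le_length (r.drop k) ['\n']
    rw [List.length_drop] at hfle
    have h01 : (-1 : ℤ) + 1 = 0 := by norm_num
    by_cases hgo : PySem.Chars.rfind.go (r.take k) ['\n'] k = -1 <;>
      by_cases hfd : PySem.Chars.find (r.drop k) ['\n'] = -1
    · simp only [if_pos hgo, if_pos hfd, if_true]
      rw [h01, hlen_s, pv_slice_shift0 l r _ (by positivity) (le_refl _)]
    · have hf0 : 0 ≤ PySem.Chars.find (r.drop k) ['\n'] := by omega
      simp only [if_pos hgo, if_neg hfd,
        if_neg (show ¬(((l.length + 1 + k : ℕ) : ℤ) + PySem.Chars.find (r.drop k) ['\n'] = -1) by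
          push_cast; omega),
        if_neg (show ¬((k : ℤ) + PySem.Chars.find (r.drop k) ['\n'] = -1) by omega)]
      rw [h01]
      have hB : ((l.length + 1 + k : ℕ) : ℤ) + PySem.Chars.find (r.drop k) ['\n'] =
          (l.length : ℤ) + 1 + ((k : ℤ) + PySem.Chars.find (r.drop k) ['\n']) := by
        push_cast; ring
      rw [hB, pv_slice_shift0 l r _ (by omega) (by omega)]
    · have hg0 : 0 ≤ PySem.Chars.rfind.go (r.take k) ['\n'] k := by omega
      simp only [if_neg hgo, if_pos hfd, if_true]
      have hA : (l.length : ℤ) + 1 + PySem.Chars.rfind.go (r.take k) ['\n'] k + 1 =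
          (l.length : ℤ) + 1 + (PySem.Chars.rfind.go (r.take k) ['\n'] k + 1) := by ring
      rw [hlen_s, hA,
        pv_slice_shift l r _ _ (by omega) (by positivity) (by omega) (le_refl _)]
    · have hg0 : 0 ≤ PySem.Chars.rfind.go (r.take k) ['\n'] k := by omega
      have hf0 : 0 ≤ PySem.Chars.find (r.drop k) ['\n'] := by omega
      simp only [if_neg hgo, if_neg hfd,
        if_neg (show ¬(((l.length + 1 + k : ℕ) : ℤ) + PySem.Chars.find (r.drop k) ['\n'] = -1) by
          push_cast; omega),
        if_neg (show ¬((k : ℤ) + PySem.Chars.find (r.drop k) ['\n'] = -1) by omega)]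
      have hA : (l.length : ℤ) + 1 + PySem.Chars.rfind.go (r.take k) ['\n'] k + 1 =
          (l.length : ℤ) + 1 + (PySem.Chars.rfind.go (r.take k) ['\n'] k + 1) := by ring
      have hB : ((l.length + 1 + k : ℕ) : ℤ) + PySem.Chars.find (r.drop k) ['\n'] =
          (l.length : ℤ) + 1 + ((k : ℤ) + PySem.Chars.find (r.drop k) ['\n']) := by
        push_cast; ring
      rw [hA, hB, pv_slice_shift l r _ _ (by omega) (by omega) (by omega) (by omega)]

theorem pv_core_aux : ∀ (n : ℕ) (s : List Char), s.length ≤ n →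
    pvALoop (PySem.Chars.splitOn s ['\n']) = pvBCore s := by
  intro n
  induction n with
  | zero =>
    intro s hs
    have : s = [] := List.eq_nil_of_length_eq_zero (by omega)
    subst this
    exact pv_base
  | succ n ih =>
    intro s hs
    by_cases hmem : ('\n' : Char) ∈ s
    · obtain ⟨l, r, rfl, hl⟩ := List.eq_append_cons_of_mem hmem
      have hr_len : r.length ≤ n := by
        have : (l ++ '\n' :: r).length = l.length + 1 + r.length := by simp; omega
        omega
      rw [pv_splitOn_cons hl r]
      simp only [pvALoop, pv_E_lit]
      cases hEl : PySem.Chars.isIn ['E','a','r','n','i','n','g','s'] l with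
      | true =>
        rw [if_pos rfl, pv_core_line1 r hl hEl]
        simp [PySem.Chars.slice]
      | false =>
        rw [if_neg (by simp), pv_core_shift r hEl]
        exact ih r hr_len
    · rw [pv_splitOn_single hmem]
      exact pv_core_nonl hmem

theorem pv_core (s : List Char) :
    pvALoop (PySem.Chars.splitOn s "\n".toList) = pvBCore s := by
  rw [pv_nl_toList]
  exact pv_core_aux s.length s (le_refl _)

-- ===== VERDICT (by name: the statement is the Claim_ definition above) =====
theorem extract_html_py_spec : Claim_equal_extract_html_py := by
  intro html _
  unfold Spec_extract_html_py extract_html_py extract_html_py_alt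
  exact congrArg String.ofList (pv_core html.toList)
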